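-- pv_equiv track=rewrite | github.com/TeaTimeJack/DI-FullStack-2025 | week-1/day-4/daily-challenge/daily-challenge-solve-matrix.py | transform_to_2d
-- ===== SOURCE A (Python) =====
-- def transform_to_2d(arg):
--     list_2d = []
--     row_2d = []
--     for char in arg:
--         if char == "\n":
--             if row_2d:
--                 list_2d.append(row_2d)
--                 row_2d = []
--             continue
--         else: row_2d.append(char)
--     list_2d.append(row_2d)
--     return list_2d
-- ===== SOURCE B (Python) =====
-- def transform_to_2d(arg):
--     # split once on newlines; keep non-empty middle segments, always keep the last one
--     segments = arg.split("\n")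
--     return [list(s) for s in segments[:-1] if s] + [list(segments[-1])]
-- ===== Notes on version B (the rewrite author's own statement) =====
-- stated objective: idiomatic
-- what changed: Replaces the char-by-char accumulator loop with a single str.split on the newline separator followed by a comprehension that keeps non-empty middle segments and appends the final segment unconditionally.
import Mathlib
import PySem

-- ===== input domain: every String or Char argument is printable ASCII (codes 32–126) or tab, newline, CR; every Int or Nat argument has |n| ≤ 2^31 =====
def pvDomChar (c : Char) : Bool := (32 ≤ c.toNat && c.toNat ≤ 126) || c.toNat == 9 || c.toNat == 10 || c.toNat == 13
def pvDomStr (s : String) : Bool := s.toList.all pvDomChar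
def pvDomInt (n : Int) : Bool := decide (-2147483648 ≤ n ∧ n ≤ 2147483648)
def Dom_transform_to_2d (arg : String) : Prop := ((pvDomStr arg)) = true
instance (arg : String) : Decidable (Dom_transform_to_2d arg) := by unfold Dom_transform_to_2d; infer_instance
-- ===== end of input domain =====

-- B replaces A's char-by-char accumulator loop with one split("\n") pass plus a comprehension (idiomatic; return value proved equal on all strings).


-- ===== PORT A =====
-- one loop iteration of A: on '\n' flush the row if non-empty, else append the 1-char string
def aStep (st : List (List String) × List String) (ch : Char) : List (List String) × List String :=
  if ch = '\n' then (if st.2 ≠ [] then (st.1 ++ [st.2], []) else st)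
  else (st.1, st.2 ++ [ch.toString])

def transform_to_2d (arg : String) : List (List String) :=
  let r := arg.toList.foldl aStep ([], [])
  r.1 ++ [r.2]

-- ===== PORT B =====
def transform_to_2d_alt (arg : String) : List (List String) :=
  let segments := PySem.Chars.splitOn arg.toList ['\n']
  -- segments[-1] is safe in Source B: str.split always returns at least one piece; .getD [] is never taken
  ((PySem.List.slice segments none (some (-1))).filter (fun s => s ≠ [])).map
      (fun s => s.map Char.toString)
    ++ [((PySem.List.pyGet? segments (-1)).getD []).map Char.toString]

-- ===== PRECONDITION & SPEC =====
def Spec_transform_to_2d (arg : String) (out : List (List String)) : Prop := out = transform_to_2d_alt arg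
instance (arg : String) (out : List (List String)) : Decidable (Spec_transform_to_2d arg out) := by unfold Spec_transform_to_2d; infer_instance

-- ===== CLAIM (what is proved, stated in full; the proofs are below) =====
def Claim_equal_transform_to_2d : Prop := ∀ (arg : String), Dom_transform_to_2d arg → Spec_transform_to_2d arg (transform_to_2d arg)

-- ===== LEMMAS AND PROOFS =====

-- reference splitter: Python's s.split("\n") as a structural recursion
def splitNl : List Char → List (List Char)
  | [] => [[]]
  | c :: cs =>
    if c = '\n' then [] :: splitNl cs
    else match splitNl cs with
      | h :: t => (c :: h) :: t
      | [] => [[c]]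

theorem splitNl_ne_nil (l : List Char) : splitNl l ≠ [] := by
  cases l with
  | nil => simp [splitNl]
  | cons c cs =>
    simp only [splitNl]
    split
    · simp
    · split <;> simp

def consHead (x : List Char) : List (List Char) → List (List Char)
  | [] => [x]
  | h :: t => (x ++ h) :: t

theorem go_eq (fuel : Nat) : ∀ (l cur : List Char) (acc : List (List Char)), l.length ≤ fuel →
    PySem.Chars.splitOn.go ['\n'] fuel l cur acc = acc.reverse ++ consHead cur.reverse (splitNl l) := by
  induction fuel with
  | zero =>
    intro l cur acc h
    have : l = [] := List.length_eq_zero_iff.mp (Nat.le_zero.mp h)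
    subst this
    simp [PySem.Chars.splitOn.go, splitNl, consHead]
  | succ f ih =>
    intro l cur acc h
    cases l with
    | nil => simp [PySem.Chars.splitOn.go, splitNl, consHead]
    | cons c rest =>
      rw [PySem.Chars.splitOn.go]
      by_cases hc : c = '\n'
      · subst hc
        have hpre : List.isPrefixOf ['\n'] ('\n' :: rest) = true := by
          simp [List.isPrefixOf]
        rw [if_pos hpre]
        simp only [List.length_cons, List.drop_succ_cons, List.length_nil, List.drop_zero]
        rw [ih rest [] (cur.reverse :: acc) (Nat.le_of_succ_le_succ (by simpa using h))]
        simp only [splitNl]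
        cases hs : splitNl rest with
        | nil => exact absurd hs (splitNl_ne_nil rest)
        | cons h0 t => simp [consHead]
      · have hpre : List.isPrefixOf ['\n'] (c :: rest) = false := by
          simp [List.isPrefixOf]
          exact fun he => absurd he.symm hc
        rw [if_neg (by simp [hpre])]
        rw [ih rest (c :: cur) acc (Nat.le_of_succ_le_succ (by simpa using h))]
        simp only [splitNl, if_neg hc, List.reverse_cons]
        cases hs : splitNl rest with
        | nil => exact absurd hs (splitNl_ne_nil rest)
        | cons h0 t => simp [consHead]

theorem splitOn_newline (l : List Char) : PySem.Chars.splitOn l ['\n'] = splitNl l := by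
  rw [PySem.Chars.splitOn, go_eq (l.length + 1) l [] [] (Nat.le_succ _)]
  cases hs : splitNl l with
  | nil => exact absurd hs (splitNl_ne_nil l)
  | cons h0 t => simp [consHead]

-- the rows produced from segments, with R the row under construction when the first segment starts
def rows (R : List String) : List (List Char) → List (List String)
  | [] => []
  | [s] => [R ++ s.map Char.toString]
  | s :: rest => (if R ++ s.map Char.toString ≠ [] then [R ++ s.map Char.toString] else []) ++ rows [] rest

theorem foldl_inv : ∀ (l : List Char) (L : List (List String)) (R : List String),
    (l.foldl aStep (L, R)).1 ++ [(l.foldl aStep (L, R)).2] = L ++ rows R (splitNl l) := by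
  intro l
  induction l with
  | nil => intro L R; simp [splitNl, rows]
  | cons c cs ih =>
    intro L R
    simp only [List.foldl_cons]
    by_cases hc : c = '\n'
    · subst hc
      have hsplit : splitNl ('\n' :: cs) = [] :: splitNl cs := by simp [splitNl]
      rw [hsplit]
      cases hs : splitNl cs with
      | nil => exact absurd hs (splitNl_ne_nil cs)
      | cons h0 t =>
        by_cases hR : R = []
        · subst hR
          have hstep : aStep (L, ([] : List String)) '\n' = (L, []) := by simp [aStep]
          rw [hstep, ih L []]
          simp [rows, hs]
        · have hstep : aStep (L, R) '\n' = (L ++ [R], []) := by simp [aStep, hR]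
          rw [hstep, ih (L ++ [R]) []]
          simp [rows, hs, hR]
    · have hstep : aStep (L, R) c = (L, R ++ [c.toString]) := by simp [aStep, hc]
      rw [hstep, ih L (R ++ [c.toString])]
      cases hs : splitNl cs with
      | nil => exact absurd hs (splitNl_ne_nil cs)
      | cons h0 t =>
        have hsplit : splitNl (c :: cs) = (c :: h0) :: t := by simp [splitNl, hc, hs]
        rw [hsplit]
        cases t with
        | nil => simp [rows]
        | cons t0 t1 => simp [rows]

theorem rows_eq_B : ∀ (segs : List (List Char)), segs ≠ [] →
    ((segs.dropLast.filter (fun s => s ≠ [])).map (fun s => s.map Char.toString))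
      ++ [(segs.getLast?.getD []).map Char.toString] = rows [] segs := by
  intro segs
  induction segs with
  | nil => intro h; exact absurd rfl h
  | cons s rest ih =>
    intro _
    cases rest with
    | nil => simp [rows]
    | cons r t =>
      by_cases hs : s = []
      · subst hs
        simp only [List.dropLast_cons_of_ne_nil (by simp : r :: t ≠ [])]
        rw [List.filter_cons_of_neg (by simp)]
        simp only [List.getLast?_cons_cons]
        rw [show (List.getLast? (r :: t)).getD [] = ((r :: t).getLast?.getD []) from rfl]
        rw [ih (by simp)]
        simp [rows]
      · simp only [List.dropLast_cons_of_ne_nil (by simp : r :: t ≠ [])]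
        rw [List.filter_cons_of_pos (by simpa using hs)]
        simp only [List.map_cons, List.getLast?_cons_cons, List.cons_append]
        rw [ih (by simp)]
        simp [rows, hs]

-- ===== VERDICT (by name: the statement is the Claim_ definition above) =====
theorem transform_to_2d_spec : Claim_equal_transform_to_2d := by
  unfold Claim_equal_transform_to_2d
  intro arg _
  unfold Spec_transform_to_2d transform_to_2d transform_to_2d_alt
  simp only [splitOn_newline, PySem.List.slice_to_neg_one, PySem.List.pyGet?_neg_one]
  rw [rows_eq_B _ (splitNl_ne_nil arg.toList)]
  simpa using foldl_inv arg.toList [] []
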